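-- pv_equiv track=rewrite | github.com/pjjoy/python | study_homeworks/piljung/algorithm/level1/Excercise4_gymsuit.py | solution
-- ===== SOURCE A (Python) =====
-- def solution(n, lost, reserve):
--     save = []
--     resetlost = set(lost) - set(reserve)
--     resetreserve = set(reserve) - set(lost)  # 여분있는 사람이 도난 당했을 경우 빌려줄 수 없으므로 삭제
--
--     if len(resetreserve) <= len(resetlost):
--         for lostst in resetlost:
--             for reservest in resetreserve:
--                 if lostst == reservest - 1 or lostst == reservest + 1:
--                     save.append(reservest)
--     else:
--         for lostst in resetlost:
--             for reservest in resetreserve: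
--                 if reservest == lostst - 1 or reservest == lostst + 1:
--                     save.append(lostst)
--
--     a = len(list(set(save)))  #
--     answer = n - len(lost) + a
--
--     return answer
-- ===== SOURCE B (Python) =====
-- def solution(n, lost, reserve):
--     rl = set(lost) - set(reserve)
--     rr = set(reserve) - set(lost)
--     small, other = (rr, rl) if len(rr) <= len(rl) else (rl, rr)
--     neighbors = {x - 1 for x in other} | {x + 1 for x in other}
--     return n - len(lost) + len(small & neighbors)
-- ===== Notes on version B (the rewrite author's own statement) =====
-- stated objective: faster
-- what changed: Replaces A's nested scan over the two difference sets plus a final dedup pass with a precomputed shifted-neighbor set and a single set intersection, keeping A's '<=' tie direction for which side is counted.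
import Mathlib
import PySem

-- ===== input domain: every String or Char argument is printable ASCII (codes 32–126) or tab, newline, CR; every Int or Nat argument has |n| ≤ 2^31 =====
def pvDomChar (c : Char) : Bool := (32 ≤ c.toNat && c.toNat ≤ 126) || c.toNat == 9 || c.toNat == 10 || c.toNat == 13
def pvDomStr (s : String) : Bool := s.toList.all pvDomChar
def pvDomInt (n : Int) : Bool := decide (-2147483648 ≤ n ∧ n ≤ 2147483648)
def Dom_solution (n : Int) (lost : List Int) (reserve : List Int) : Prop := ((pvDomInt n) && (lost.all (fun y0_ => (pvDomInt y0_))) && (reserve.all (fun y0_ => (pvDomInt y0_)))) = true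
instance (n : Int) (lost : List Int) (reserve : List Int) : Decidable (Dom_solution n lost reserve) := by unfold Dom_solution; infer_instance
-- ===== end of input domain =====

-- B replaces A's nested scan + final dedup with a shifted-neighbor set and one intersection.
-- ===== PORT A =====
def solution (n : Int) (lost : List Int) (reserve : List Int) : Int :=
  let resetlost : PySem.Set Int := PySem.Set.diff (PySem.Set.ofList lost) reserve
  let resetreserve : PySem.Set Int := PySem.Set.diff (PySem.Set.ofList reserve) lost
  let save : List Int :=
    if PySem.Set.len resetreserve ≤ PySem.Set.len resetlost then
      resetlost.foldl (fun acc lostst =>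
        resetreserve.foldl (fun acc reservest =>
          if lostst == reservest - 1 || lostst == reservest + 1 then acc ++ [reservest] else acc) acc) []
    else
      resetlost.foldl (fun acc lostst =>
        resetreserve.foldl (fun acc reservest =>
          if reservest == lostst - 1 || reservest == lostst + 1 then acc ++ [lostst] else acc) acc) []
  let a : Int := PySem.Set.len (PySem.Set.ofList save)
  n - (lost.length : Int) + a

-- ===== PORT B =====
def solution_alt (n : Int) (lost : List Int) (reserve : List Int) : Int :=
  let rl : PySem.Set Int := PySem.Set.diff (PySem.Set.ofList lost) reserve
  let rr : PySem.Set Int := PySem.Set.diff (PySem.Set.ofList reserve) lost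
  let p : PySem.Set Int × PySem.Set Int :=
    if PySem.Set.len rr ≤ PySem.Set.len rl then (rr, rl) else (rl, rr)
  let neighbors : PySem.Set Int :=
    PySem.Set.union (PySem.Set.ofList (p.2.map (fun x => x - 1))) (p.2.map (fun x => x + 1))
  n - (lost.length : Int) + PySem.Set.len (PySem.Set.inter p.1 neighbors)

-- ===== PRECONDITION & SPEC =====
def Spec_solution (n : Int) (lost : List Int) (reserve : List Int) (out : Int) : Prop := out = solution_alt n lost reserve
instance (n : Int) (lost : List Int) (reserve : List Int) (out : Int) : Decidable (Spec_solution n lost reserve out) := by unfold Spec_solution; infer_instance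

-- ===== CLAIM (what is proved, stated in full; the proofs are below) =====
def Claim_equal_solution : Prop := ∀ (n : Int) (lost : List Int) (reserve : List Int), Dom_solution n lost reserve → Spec_solution n lost reserve (solution n lost reserve)

-- ===== LEMMAS AND PROOFS =====

-- the deduplicated nested-loop output of A is a permutation of B's intersection, so the counts agree
lemma count_adj (small other save : List Int) (hs : small.Nodup)
    (hmem : ∀ x : Int, x ∈ save ↔ x ∈ small ∧ ∃ y ∈ other, x = y + 1 ∨ x = y - 1) :
    PySem.Set.len (PySem.Set.ofList save) =
    PySem.Set.len (PySem.Set.inter small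
      (PySem.Set.union (PySem.Set.ofList (other.map (fun x => x - 1))) (other.map (fun x => x + 1)))) := by
  have hperm : (PySem.Set.ofList save).Perm (PySem.Set.inter small
      (PySem.Set.union (PySem.Set.ofList (other.map (fun x => x - 1))) (other.map (fun x => x + 1)))) := by
    rw [List.perm_ext_iff_of_nodup (PySem.Set.nodup_ofList _) (PySem.Set.nodup_inter _ _ hs)]
    intro x
    simp only [PySem.Set.mem_ofList, PySem.Set.mem_inter, PySem.Set.mem_union, List.mem_map, hmem]
    constructor
    · rintro ⟨h1, y, hy, h2 | h2⟩
      · exact ⟨h1, Or.inr ⟨y, hy, by omega⟩⟩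
      · exact ⟨h1, Or.inl ⟨y, hy, by omega⟩⟩
    · rintro ⟨h1, ⟨y, hy, h2⟩ | ⟨y, hy, h2⟩⟩
      · exact ⟨h1, y, hy, by omega⟩
      · exact ⟨h1, y, hy, by omega⟩
  simp only [PySem.Set.len]
  exact_mod_cast hperm.length_eq

-- membership of A's first nested loop (append the reserve-side element)
lemma mem_loop1 (rl rr : List Int) (x : Int) :
    x ∈ rl.foldl (fun acc lostst =>
        rr.foldl (fun acc reservest =>
          if lostst == reservest - 1 || lostst == reservest + 1 then acc ++ [reservest] else acc) acc) [] ↔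
    x ∈ rr ∧ ∃ y ∈ rl, x = y + 1 ∨ x = y - 1 := by
  simp only [PySem.List.foldl_append_if_eq_filter, PySem.List.foldl_append_eq_flatMap]
  simp only [List.nil_append, List.mem_flatMap, List.mem_filter, Bool.or_eq_true, beq_iff_eq]
  constructor
  · rintro ⟨y, hy, hx, h⟩; exact ⟨hx, y, hy, by omega⟩
  · rintro ⟨hx, y, hy, h⟩; exact ⟨y, hy, hx, by omega⟩

-- membership of A's second nested loop (append the lost-side element)
lemma mem_loop2 (rl rr : List Int) (x : Int) :
    x ∈ rl.foldl (fun acc lostst =>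
        rr.foldl (fun acc reservest =>
          if reservest == lostst - 1 || reservest == lostst + 1 then acc ++ [lostst] else acc) acc) [] ↔
    x ∈ rl ∧ ∃ y ∈ rr, x = y + 1 ∨ x = y - 1 := by
  simp only [PySem.List.foldl_append_if, PySem.List.foldl_append_eq_flatMap]
  simp only [List.nil_append, List.mem_flatMap, List.mem_map, List.mem_filter, Bool.or_eq_true,
    beq_iff_eq]
  constructor
  · rintro ⟨y, hy, r, ⟨hr, h⟩, rfl⟩; exact ⟨hy, r, hr, by omega⟩
  · rintro ⟨hx, y, hy, h⟩; exact ⟨x, hx, y, ⟨hy, by omega⟩, rfl⟩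

-- ===== VERDICT (by name: the statement is the Claim_ definition above) =====
theorem solution_spec : Claim_equal_solution := by
  intro n lost reserve _
  unfold Spec_solution solution solution_alt
  dsimp only
  split_ifs with h
  · have := count_adj (PySem.Set.diff (PySem.Set.ofList reserve) lost)
      (PySem.Set.diff (PySem.Set.ofList lost) reserve) _
      (PySem.Set.nodup_diff _ _ (PySem.Set.nodup_ofList _))
      (mem_loop1 (PySem.Set.diff (PySem.Set.ofList lost) reserve)
        (PySem.Set.diff (PySem.Set.ofList reserve) lost))
    rw [this]
  · have := count_adj (PySem.Set.diff (PySem.Set.ofList lost) reserve)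
      (PySem.Set.diff (PySem.Set.ofList reserve) lost) _
      (PySem.Set.nodup_diff _ _ (PySem.Set.nodup_ofList _))
      (mem_loop2 (PySem.Set.diff (PySem.Set.ofList lost) reserve)
        (PySem.Set.diff (PySem.Set.ofList reserve) lost))
    rw [this]
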